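-- pv_equiv track=rewrite | github.com/bartmanski/Sztuczna-Inteligencja | Lista 1/zad5.py | opt_dist
-- ===== SOURCE A (Python) =====
-- def opt_dist(lst, D):
--     n = len(lst)
--     min_changes = float('inf')
--
--     for start in range(n - D + 1):
--         changes = sum(1 for i in range(n) if (start <= i < start + D) != (lst[i] == 1))
--         min_changes = min(min_changes, changes)
--
--     if D == 0:
--         return lst.count(1)
--
--     return min_changes
-- ===== SOURCE B (Python) =====
-- def opt_dist(lst, D):
--     # Sliding window: cost(start) = total_ones + D - 2*ones_in_window, updated in O(1) per shift.
--     total = lst.count(1)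
--     if D <= 0:
--         return total
--     ones = lst[:D].count(1)
--     best = total + D - 2 * ones
--     for i in range(D, len(lst)):
--         ones += (lst[i] == 1) - (lst[i - D] == 1)
--         best = min(best, total + D - 2 * ones)
--     return best
-- ===== Notes on version B (the rewrite author's own statement) =====
-- stated objective: faster
-- what changed: Replaces A's O(n) mismatch recount per window start by a single sliding-window pass maintaining the ones-count, using cost(start) = total_ones + D - 2*ones_in_window.
-- outside the precondition, e.g. on opt_dist([], 1): A returns inf, B returns 1
import Mathlib
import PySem

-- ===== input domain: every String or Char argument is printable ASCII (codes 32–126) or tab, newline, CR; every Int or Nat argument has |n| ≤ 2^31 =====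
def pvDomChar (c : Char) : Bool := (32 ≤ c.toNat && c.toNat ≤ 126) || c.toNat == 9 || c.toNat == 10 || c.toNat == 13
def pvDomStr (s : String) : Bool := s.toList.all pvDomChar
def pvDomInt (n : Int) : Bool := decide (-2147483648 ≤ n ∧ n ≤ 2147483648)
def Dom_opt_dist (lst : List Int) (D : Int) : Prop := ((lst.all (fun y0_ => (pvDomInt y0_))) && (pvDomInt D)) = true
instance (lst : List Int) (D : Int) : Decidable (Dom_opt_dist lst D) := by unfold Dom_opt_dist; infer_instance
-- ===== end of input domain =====

-- B replaces A's per-window full recount by a one-pass sliding window using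
-- cost(start) = total_ones + D - 2*ones_in_window.

-- ===== PORT A =====
-- float('inf') is modelled as `none` in an Option Int accumulator; it survives the loop only
-- when D > len(lst) (then A returns a float, not an int), which Pre_ excludes; the final
-- `.getD 0` is reached with `none` only outside Pre_.
def opt_dist (lst : List Int) (D : Int) : Int :=
  let n : Int := (lst.length : Int)
  let min_changes : Option Int :=
    (PySem.List.pyRange 0 (n - D + 1) 1).foldl
      (fun mc start =>
        let changes : Int :=
          (PySem.List.pyRange 0 n 1).foldl
            (fun acc i =>
              if (decide (start ≤ i ∧ i < start + D)) != (PySem.List.pyGetD lst i 0 == 1)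
              then acc + 1 else acc) 0
        some (match mc with
              | none => changes
              | some m => min m changes))
      none
  if D == 0 then (PySem.List.count lst 1 : Int)
  else min_changes.getD 0

-- ===== PORT B =====
def opt_dist_alt (lst : List Int) (D : Int) : Int :=
  let total : Int := (PySem.List.count lst 1 : Int)
  if D ≤ 0 then total
  else
    let ones0 : Int := (PySem.List.count (PySem.List.slice lst none (some D)) 1 : Int)
    let res : Int × Int :=
      (PySem.List.pyRange D (lst.length : Int) 1).foldl
        (fun (st : Int × Int) i =>
          let ones : Int := st.1 + (if PySem.List.pyGetD lst i 0 == 1 then 1 else 0)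
                                 - (if PySem.List.pyGetD lst (i - D) 0 == 1 then 1 else 0)
          (ones, min st.2 (total + D - 2 * ones)))
        (ones0, total + D - 2 * ones0)
    res.2

-- ===== PRECONDITION & SPEC =====
-- Pre_ excludes only D > len(lst): there A's loop never runs and A returns float('inf'),
-- which is not a value of the declared int type.
def Pre_opt_dist (lst : List Int) (D : Int) : Prop := D ≤ (lst.length : Int)
instance (lst : List Int) (D : Int) : Decidable (Pre_opt_dist lst D) := by unfold Pre_opt_dist; infer_instance
def pvWitness_opt_dist : List Int × Int := ([1, 0, 1], 2)

def Spec_opt_dist (lst : List Int) (D : Int) (out : Int) : Prop := out = opt_dist_alt lst D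
instance (lst : List Int) (D : Int) (out : Int) : Decidable (Spec_opt_dist lst D out) := by unfold Spec_opt_dist; infer_instance

-- ===== CLAIM (what is proved, stated in full; the proofs are below) =====
def Claim_equal_opt_dist : Prop := ∀ (lst : List Int) (D : Int), Dom_opt_dist lst D → Pre_opt_dist lst D → Spec_opt_dist lst D (opt_dist lst D)

-- ===== LEMMAS AND PROOFS =====

-- number of ones among the entries of lst whose index lies in [s, s+D), read via pyGetD
def pvOnes (lst : List Int) (D s : Int) : Int :=
  ((PySem.List.pyRange s (s + D) 1).countP (fun i => PySem.List.pyGetD lst i 0 == 1) : Int)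

-- cost of the window starting at s
def pvF (lst : List Int) (D s : Int) : Int :=
  (PySem.List.count lst 1 : Int) + D - 2 * pvOnes lst D s

-- inclusion–exclusion for a counted xor of two boolean tests
theorem pv_xor_count (a b : Int → Bool) (l : List Int) :
    ((l.countP (fun i => a i != b i) : Int))
    = (l.countP a : Int) + (l.countP b : Int) - 2 * (l.countP (fun i => a i && b i) : Int) := by
  induction l with
  | nil => simp
  | cons x t ih =>
    rcases ha : a x <;> rcases hb : b x <;> simp [ha, hb] <;> omega

-- counting ones through indices over the full range is counting ones in the list
theorem pv_count_ones (lst : List Int) :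
    (PySem.List.pyRange 0 (lst.length : Int) 1).countP (fun i => PySem.List.pyGetD lst i 0 == 1)
    = PySem.List.count lst 1 := by
  have h := PySem.List.map_pyGetD_pyRange_zero' (xs := lst) (d := 0)
  calc (PySem.List.pyRange 0 (lst.length : Int) 1).countP (fun i => PySem.List.pyGetD lst i 0 == 1)
      = ((PySem.List.pyRange 0 (lst.length : Int) 1).map (fun j => PySem.List.pyGetD lst j 0)).countP (fun x => x == 1) := by
        rw [List.countP_map]; rfl
    _ = PySem.List.count lst 1 := by rw [h]; simp [PySem.List.count, List.count]

-- A's inner sum equals the window cost pvF s, for a window fully inside [0, n)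
theorem pv_changes_eq (lst : List Int) (D s : Int) (hD : 0 < D) (hs : 0 ≤ s)
    (hsD : s + D ≤ (lst.length : Int)) :
    (PySem.List.pyRange 0 (lst.length : Int) 1).foldl
      (fun acc i =>
        if (decide (s ≤ i ∧ i < s + D)) != (PySem.List.pyGetD lst i 0 == 1)
        then acc + 1 else acc) 0
    = pvF lst D s := by
  rw [PySem.List.foldl_if_add_one]
  rw [pv_xor_count (fun i => decide (s ≤ i ∧ i < s + D)) (fun i => PySem.List.pyGetD lst i 0 == 1)]
  have h2 : PySem.List.pyRange s (lst.length : Int) 1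
      = PySem.List.pyRange s (s + D) 1 ++ PySem.List.pyRange (s + D) (lst.length : Int) 1 :=
    PySem.List.pyRange_one_append s (s + D) (lst.length : Int) (by omega) hsD
  have hsplit : PySem.List.pyRange 0 (lst.length : Int) 1
      = PySem.List.pyRange 0 s 1 ++ (PySem.List.pyRange s (s + D) 1 ++ PySem.List.pyRange (s + D) (lst.length : Int) 1) := by
    rw [← h2]
    exact PySem.List.pyRange_one_append 0 s (lst.length : Int) hs (by omega)
  have hlow : ∀ i ∈ PySem.List.pyRange 0 s 1, ¬ (s ≤ i ∧ i < s + D) := by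
    intro i hi
    rw [PySem.List.mem_pyRange_one] at hi; omega
  have hhigh : ∀ i ∈ PySem.List.pyRange (s + D) (lst.length : Int) 1, ¬ (s ≤ i ∧ i < s + D) := by
    intro i hi
    rw [PySem.List.mem_pyRange_one] at hi; omega
  have hmid : ∀ i ∈ PySem.List.pyRange s (s + D) 1, (s ≤ i ∧ i < s + D) := by
    intro i hi
    rw [PySem.List.mem_pyRange_one] at hi; omega
  have ha : (PySem.List.pyRange 0 (lst.length : Int) 1).countP (fun i => decide (s ≤ i ∧ i < s + D))
      = D.toNat := by
    rw [hsplit, List.countP_append, List.countP_append]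
    have e1 : (PySem.List.pyRange 0 s 1).countP (fun i => decide (s ≤ i ∧ i < s + D)) = 0 :=
      List.countP_eq_zero.mpr (fun i hi => by simpa using hlow i hi)
    have e3 : (PySem.List.pyRange (s + D) (lst.length : Int) 1).countP (fun i => decide (s ≤ i ∧ i < s + D)) = 0 :=
      List.countP_eq_zero.mpr (fun i hi => by simpa using hhigh i hi)
    have e2 : (PySem.List.pyRange s (s + D) 1).countP (fun i => decide (s ≤ i ∧ i < s + D))
        = (PySem.List.pyRange s (s + D) 1).length :=
      List.countP_eq_length.mpr (fun i hi => by simpa using hmid i hi)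
    rw [e1, e2, e3, PySem.List.length_pyRange_one]; omega
  have hab : (PySem.List.pyRange 0 (lst.length : Int) 1).countP
        (fun i => decide (s ≤ i ∧ i < s + D) && (PySem.List.pyGetD lst i 0 == 1))
      = (PySem.List.pyRange s (s + D) 1).countP (fun i => PySem.List.pyGetD lst i 0 == 1) := by
    rw [hsplit, List.countP_append, List.countP_append]
    have e1 : (PySem.List.pyRange 0 s 1).countP (fun i => decide (s ≤ i ∧ i < s + D) && (PySem.List.pyGetD lst i 0 == 1)) = 0 :=
      List.countP_eq_zero.mpr (fun i hi => by simp [hlow i hi])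
    have e3 : (PySem.List.pyRange (s + D) (lst.length : Int) 1).countP (fun i => decide (s ≤ i ∧ i < s + D) && (PySem.List.pyGetD lst i 0 == 1)) = 0 :=
      List.countP_eq_zero.mpr (fun i hi => by simp [hhigh i hi])
    have e2 : (PySem.List.pyRange s (s + D) 1).countP (fun i => decide (s ≤ i ∧ i < s + D) && (PySem.List.pyGetD lst i 0 == 1))
        = (PySem.List.pyRange s (s + D) 1).countP (fun i => PySem.List.pyGetD lst i 0 == 1) :=
      List.countP_congr (fun i hi => by simp [hmid i hi])
    rw [e1, e2, e3]; omega
  rw [ha, hab, pv_count_ones]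
  unfold pvF pvOnes
  omega

-- D < 0: every window is empty, A's inner sum counts all the ones
theorem pv_changes_eq_total (lst : List Int) (D s : Int) (hD : D < 0) :
    (PySem.List.pyRange 0 (lst.length : Int) 1).foldl
      (fun acc i =>
        if (decide (s ≤ i ∧ i < s + D)) != (PySem.List.pyGetD lst i 0 == 1)
        then acc + 1 else acc) 0
    = (PySem.List.count lst 1 : Int) := by
  rw [PySem.List.foldl_if_add_one]
  have : (PySem.List.pyRange 0 (lst.length : Int) 1).countP
      (fun i => (decide (s ≤ i ∧ i < s + D)) != (PySem.List.pyGetD lst i 0 == 1))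
      = (PySem.List.pyRange 0 (lst.length : Int) 1).countP (fun i => PySem.List.pyGetD lst i 0 == 1) :=
    List.countP_congr (fun i hi => by
      have : ¬ (s ≤ i ∧ i < s + D) := by omega
      simp [this])
  rw [this, pv_count_ones]; omega

-- generic shape of A's running minimum started from `none` ( = inf)
theorem pv_min_fold_aux (g : Int → Int) (t : List Int) (a : Int) :
    t.foldl (fun mc s => some (match mc with | none => g s | some m => min m (g s))) (some a)
    = some (t.foldl (fun m s => min m (g s)) a) := by
  induction t generalizing a with
  | nil => rfl
  | cons x t ih => simp [List.foldl, ih]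

theorem pv_min_fold (g : Int → Int) (x : Int) (t : List Int) :
    (x :: t).foldl
      (fun mc s => some (match mc with | none => g s | some m => min m (g s)))
      (none : Option Int)
    = some (t.foldl (fun m s => min m (g s)) (g x)) := by
  simp [List.foldl, pv_min_fold_aux]

theorem pv_fold_min_const (t : List Int) (a : Int) :
    t.foldl (fun m (_ : Int) => min m a) a = a := by
  induction t with
  | nil => rfl
  | cons x t ih => simpa [List.foldl, min_self] using ih

-- entries of pyRange a b mapped through pyGetD are a contiguous piece of the list
theorem pv_map_getD (lst : List Int) (a b : Int) (h0 : 0 ≤ a) (hb : b ≤ (lst.length : Int)) :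
    (PySem.List.pyRange a b 1).map (fun j => PySem.List.pyGetD lst j 0)
    = (lst.drop a.toNat).take (b - a).toNat := by
  rw [PySem.List.pyRange_one, List.map_map]
  apply List.ext_getElem
  · simp; omega
  · intro k h1 h2
    simp only [List.getElem_map, List.getElem_range, Function.comp_apply,
      List.getElem_take, List.getElem_drop]
    rw [PySem.List.pyGetD_eq_getElem]
    · congr 1; omega
    · omega
    · simp at h1; omega

-- B's initial window count lst[:D].count(1) is pvOnes at 0
theorem pv_ones0 (lst : List Int) (D : Int) (hD : 0 < D) (hDn : D ≤ (lst.length : Int)) :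
    (PySem.List.count (PySem.List.slice lst none (some D)) 1 : Int) = pvOnes lst D 0 := by
  unfold pvOnes
  rw [show (0 : Int) + D = D by ring]
  have hmap := pv_map_getD lst 0 D (le_refl 0) hDn
  calc ((PySem.List.count (PySem.List.slice lst none (some D)) 1 : Nat) : Int)
      = ((PySem.List.slice lst none (some D)).countP (fun x => x == 1) : Int) := by
        simp [PySem.List.count, List.count]
    _ = (((PySem.List.pyRange 0 D 1).map (fun j => PySem.List.pyGetD lst j 0)).countP (fun x => x == 1) : Int) := by
        rw [PySem.List.slice_to lst (by omega), hmap]; norm_num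
    _ = ((PySem.List.pyRange 0 D 1).countP (fun i => PySem.List.pyGetD lst i 0 == 1) : Int) := by
        rw [List.countP_map]; rfl

-- sliding-window update of the ones count
theorem pv_ones_step (lst : List Int) (D s : Int) (hD : 0 < D) :
    pvOnes lst D (s + 1)
    = pvOnes lst D s + (if PySem.List.pyGetD lst (s + D) 0 == 1 then 1 else 0)
        - (if PySem.List.pyGetD lst s 0 == 1 then 1 else 0) := by
  unfold pvOnes
  rw [PySem.List.pyRange_one_cons (a := s) (b := s + D) (by omega)]
  rw [show s + 1 + D = (s + D) + 1 by ring]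
  rw [PySem.List.pyRange_one_succ_right (a := s + 1) (b := s + D) (by omega)]
  rw [List.countP_append, List.countP_cons]
  rcases h1 : (PySem.List.pyGetD lst (s + D) 0 == 1) <;>
    rcases h2 : (PySem.List.pyGetD lst s 0 == 1) <;> simp [h2]

-- B's loop invariant: after k shifts the state is (window count at k, running min of pvF on [0, k])
theorem pv_slide (lst : List Int) (D : Int) (hD : 0 < D) (k : Nat) :
    (PySem.List.pyRange D (D + (k : Int)) 1).foldl
      (fun (st : Int × Int) i =>
        ((st.1 + (if PySem.List.pyGetD lst i 0 == 1 then 1 else 0))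
           - (if PySem.List.pyGetD lst (i - D) 0 == 1 then 1 else 0),
         min st.2 ((PySem.List.count lst 1 : Int) + D
           - 2 * ((st.1 + (if PySem.List.pyGetD lst i 0 == 1 then 1 else 0))
                    - (if PySem.List.pyGetD lst (i - D) 0 == 1 then 1 else 0)))))
      (pvOnes lst D 0, pvF lst D 0)
    = (pvOnes lst D (k : Int),
       (PySem.List.pyRange 1 ((k : Int) + 1) 1).foldl (fun m s => min m (pvF lst D s)) (pvF lst D 0)) := by
  induction k with
  | zero =>
    rw [PySem.List.pyRange_one_eq_nil (by omega), PySem.List.pyRange_one_eq_nil (by omega)]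
    simp
  | succ k ih =>
    push_cast
    rw [show D + ((k : Int) + 1) = (D + (k : Int)) + 1 by ring]
    rw [PySem.List.pyRange_one_succ_right (a := D) (b := D + (k : Int)) (by omega)]
    rw [show (k : Int) + 1 + 1 = ((k : Int) + 1) + 1 by ring]
    rw [PySem.List.pyRange_one_succ_right (a := 1) (b := (k : Int) + 1) (by omega)]
    rw [List.foldl_append, List.foldl_append, ih]
    simp only [List.foldl_cons, List.foldl_nil]
    have hupd : (pvOnes lst D (k : Int) + (if PySem.List.pyGetD lst (D + (k : Int)) 0 == 1 then 1 else 0))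
        - (if PySem.List.pyGetD lst ((D + (k : Int)) - D) 0 == 1 then 1 else 0)
        = pvOnes lst D ((k : Int) + 1) := by
      rw [pv_ones_step lst D (k : Int) hD]
      rw [show (D + (k : Int)) - D = (k : Int) by ring, show (k : Int) + D = D + (k : Int) by ring]
    rw [hupd]
    unfold pvF
    rfl

-- ===== VERDICT (by name: the statement is the Claim_ definition above) =====
theorem opt_dist_spec : Claim_equal_opt_dist := by
  intro lst D _hdom hpre
  unfold Pre_opt_dist at hpre
  unfold Spec_opt_dist opt_dist opt_dist_alt
  simp only []
  rcases lt_trichotomy D 0 with hD | hD | hD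
  · -- D < 0: A's every pass counts all ones, B takes the D ≤ 0 branch
    rw [if_neg (by simp; omega), if_pos (by omega)]
    rw [PySem.List.pyRange_one_cons (by omega : (0:Int) < (lst.length : Int) - D + 1)]
    rw [pv_min_fold]
    have hg : (fun (m s : Int) => min m
        ((PySem.List.pyRange 0 (lst.length : Int) 1).foldl
          (fun acc i =>
            if (decide (s ≤ i ∧ i < s + D)) != (PySem.List.pyGetD lst i 0 == 1)
            then acc + 1 else acc) 0))
        = fun (m _ : Int) => min m (PySem.List.count lst 1 : Int) := by
      funext m s
      rw [pv_changes_eq_total lst D s hD]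
    rw [pv_changes_eq_total lst D 0 hD, hg, pv_fold_min_const]
    simp
  · -- D = 0
    subst hD
    rw [if_pos (by simp), if_pos (by omega)]
  · -- 0 < D ≤ n
    rw [if_neg (by simp; omega), if_neg (by omega)]
    rw [PySem.List.pyRange_one_cons (by omega : (0:Int) < (lst.length : Int) - D + 1)]
    rw [pv_min_fold]
    rw [pv_changes_eq lst D 0 hD (le_refl 0) (by omega)]
    have hcongr := PySem.List.foldl_congr_mem
      (l := PySem.List.pyRange 1 ((lst.length : Int) - D + 1) 1)
      (f := fun (m s : Int) => min m
        ((PySem.List.pyRange 0 (lst.length : Int) 1).foldl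
          (fun acc i =>
            if (decide (s ≤ i ∧ i < s + D)) != (PySem.List.pyGetD lst i 0 == 1)
            then acc + 1 else acc) 0))
      (g := fun (m s : Int) => min m (pvF lst D s))
      (init := pvF lst D 0)
      (by
        intro acc s hs
        rw [PySem.List.mem_pyRange_one] at hs
        dsimp only
        rw [pv_changes_eq lst D s hD (by omega) (by omega)])
    rw [show ((0:Int) + 1) = 1 by norm_num, hcongr]
    -- B's side
    rw [pv_ones0 lst D hD hpre]
    obtain ⟨k, hk⟩ : ∃ k : Nat, (lst.length : Int) = D + (k : Int) :=
      ⟨((lst.length : Int) - D).toNat, by omega⟩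
    rw [hk]
    rw [show D + (k : Int) - D + 1 = (k : Int) + 1 by ring]
    rw [show (PySem.List.count lst 1 : Int) + D - 2 * pvOnes lst D 0 = pvF lst D 0 from rfl]
    rw [pv_slide lst D hD k]
    rfl
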